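-- pv_equiv track=rewrite | github.com/mecajames/NewMECAV2 | import_phase2_v2.py | transform_row_mapped
-- ===== SOURCE A (Python) =====
-- def transform_row_mapped(row, skip_indices, column_map, num_local_cols):
--     """Transform a row using column_map for reordering"""
--     columns = row.split('\t')
--
--     # First remove skipped columns
--     filtered_cols = [col for i, col in enumerate(columns) if i not in skip_indices]
--
--     # Create output array with correct size
--     output = ['\\N'] * num_local_cols  # Default to NULL
--
--     # Map columns to their new positions
--     for dump_idx, local_idx in column_map.items():
--         if dump_idx < len(filtered_cols):
--             output[local_idx] = filtered_cols[dump_idx]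
--
--     return '\t'.join(output)
-- ===== SOURCE B (Python) =====
-- def transform_row_mapped(row, skip_indices, column_map, num_local_cols):
--     """Transform a row using column_map for reordering (single fused pass).
--
--     No intermediate filtered list: walk the split columns once, keeping a
--     running filtered-position counter, and place each kept column directly."""
--     output = ['\\N'] * num_local_cols
--     dump_idx = 0
--     for i, col in enumerate(row.split('\t')):
--         if i in skip_indices:
--             continue
--         local_idx = column_map.get(dump_idx)
--         if local_idx is not None:
--             output[local_idx] = col
--         dump_idx += 1
--     return '\t'.join(output)
-- ===== Notes on version B (the rewrite author's own statement) =====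
-- stated objective: alternative
-- what changed: A builds an intermediate filtered-column list and then scatters dict entries into a preallocated output; B fuses filtering and placement into one pass over the split columns, maintaining a running filtered-position counter and looking that counter up in the map, so no filtered list is ever built.
-- intended difference: On mappings with a negative dump index in [-len(filtered), 0) whose wrapped-around filtered column is not the NULL marker '\N', A applies the entry via Python's negative-index wraparound and writes that column from the end of the filtered row, while B ignores the entry and leaves the cell '\N'; dump indices denote positions in the filtered row, so a negative key matches no position and ignoring it is the intended reading. — e.g. on transform_row_mapped("a\tb", [], [(-1, 0)], 1): A returns "b", B returns "\\N"
-- outside the precondition, e.g. on transform_row_mapped('a\tb', set(), {1: 0, 0: 0}, 1): A returns 'a', B returns 'b'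
import Mathlib
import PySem

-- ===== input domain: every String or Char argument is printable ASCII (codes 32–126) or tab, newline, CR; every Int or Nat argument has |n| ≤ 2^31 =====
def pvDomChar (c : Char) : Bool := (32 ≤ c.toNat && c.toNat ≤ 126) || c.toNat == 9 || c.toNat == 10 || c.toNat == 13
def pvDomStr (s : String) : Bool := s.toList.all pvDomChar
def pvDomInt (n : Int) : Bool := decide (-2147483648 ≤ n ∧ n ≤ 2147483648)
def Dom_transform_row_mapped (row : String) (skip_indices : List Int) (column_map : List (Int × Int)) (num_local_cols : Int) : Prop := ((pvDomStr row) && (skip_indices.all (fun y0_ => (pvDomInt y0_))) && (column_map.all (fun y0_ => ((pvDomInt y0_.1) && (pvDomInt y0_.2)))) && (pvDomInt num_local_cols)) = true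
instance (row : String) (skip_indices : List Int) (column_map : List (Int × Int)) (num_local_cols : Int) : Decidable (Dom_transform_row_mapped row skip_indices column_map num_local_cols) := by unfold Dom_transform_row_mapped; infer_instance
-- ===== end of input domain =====

-- B fuses A's two stages (build a filtered column list, then scatter dict entries into a
-- preallocated output) into ONE pass over the split columns with a running filtered-position
-- counter (objective: alternative decomposition); on the negative-dump-key corner D_ below,
-- B intentionally ignores the entry where A applies Python's negative-index wraparound.

-- ===== PORT A =====
-- helper: `[col for i, col in enumerate(columns) if i not in skip_indices]`
def pvFiltered (row : String) (skip_indices : List Int) : List String :=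
  ((PySem.List.enumerate ((PySem.Str.split? row "\t").getD [])).filter
      (fun p => !(skip_indices.contains p.1))).map (fun p => p.2)

def transform_row_mapped (row : String) (skip_indices : List Int) (column_map : List (Int × Int)) (num_local_cols : Int) : String :=
  let filtered_cols := pvFiltered row skip_indices
  let output := List.replicate num_local_cols.toNat "\\N"
  -- for dump_idx, local_idx in column_map.items(): if dump_idx < len(filtered_cols): output[local_idx] = filtered_cols[dump_idx]
  -- (pySetD / pyGetD are the total forms: Pre_ excludes the inputs where Python raises IndexError)
  let output := (PySem.Dict.ofList column_map).items.foldl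
    (fun out p => if p.1 < (filtered_cols.length : Int)
                  then PySem.List.pySetD out p.2 (PySem.List.pyGetD filtered_cols p.1 "")
                  else out) output
  PySem.Str.join "\t" output

-- ===== PORT B =====
def transform_row_mapped_alt (row : String) (skip_indices : List Int) (column_map : List (Int × Int)) (num_local_cols : Int) : String :=
  let output := List.replicate num_local_cols.toNat "\\N"
  let cm := PySem.Dict.ofList column_map
  -- dump_idx = 0; for i, col in enumerate(row.split('\t')): if i in skip_indices: continue;
  --   local_idx = column_map.get(dump_idx); if local_idx is not None: output[local_idx] = col; dump_idx += 1
  let st := (PySem.List.enumerate ((PySem.Str.split? row "\t").getD [])).foldl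
    (fun (st : List String × Int) p =>
      if skip_indices.contains p.1 then st
      else ((match cm.get? st.2 with
             | some l => PySem.List.pySetD st.1 l p.2
             | none => st.1), st.2 + 1))
    (output, 0)
  PySem.Str.join "\t" st.1

-- ===== PRECONDITION & SPEC =====
-- target cell of `output[l] = …` with len(output) = num (Python's negative-index rule)
def pvTgt (num l : Int) : Int := if l < 0 then l + num else l

-- Pre_ excludes (a) the inputs where A raises IndexError (an applied dump index below
-- -len(filtered_cols), or a local index outside [-num_local_cols, num_local_cols)), and
-- (b) mappings in which two applied entries target the SAME output cell: there last-write-wins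
-- depends on iteration order (A: dict insertion order, B: ascending dump index) and neither
-- tie-break is specified behaviour.
def Pre_transform_row_mapped (row : String) (skip_indices : List Int) (column_map : List (Int × Int)) (num_local_cols : Int) : Prop :=
  (∀ p ∈ (PySem.Dict.ofList column_map).items,
      p.1 < ((pvFiltered row skip_indices).length : Int) →
      -((pvFiltered row skip_indices).length : Int) ≤ p.1 ∧
      -num_local_cols ≤ p.2 ∧ p.2 < num_local_cols) ∧
  List.Pairwise (fun p q => pvTgt num_local_cols p.2 ≠ pvTgt num_local_cols q.2)
    ((PySem.Dict.ofList column_map).items.filter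
      (fun p => decide (p.1 < ((pvFiltered row skip_indices).length : Int))))
instance (row : String) (skip_indices : List Int) (column_map : List (Int × Int)) (num_local_cols : Int) : Decidable (Pre_transform_row_mapped row skip_indices column_map num_local_cols) := by unfold Pre_transform_row_mapped; infer_instance

def pvWitness_transform_row_mapped : String × List Int × (List (Int × Int)) × Int :=
  ("a\tb\tc", [1], [(0, 1), (1, 0)], 2)

-- On mappings with a negative dump key in [-len(filtered), 0) whose wrapped-around filtered
-- column is not the NULL marker '\N', A applies the entry via Python's negative-index
-- wraparound and writes that column, while B ignores the entry and leaves the cell '\N';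
-- dump indices denote positions in the filtered row, so a negative key matches no position
-- and ignoring it is the intended reading.
def D_transform_row_mapped (row : String) (skip_indices : List Int) (column_map : List (Int × Int)) (num_local_cols : Int) : Prop :=
  ∃ p ∈ (PySem.Dict.ofList column_map).items,
    p.1 < 0 ∧ -((pvFiltered row skip_indices).length : Int) ≤ p.1 ∧
    PySem.List.pyGetD (pvFiltered row skip_indices) p.1 "" ≠ "\\N"
instance (row : String) (skip_indices : List Int) (column_map : List (Int × Int)) (num_local_cols : Int) : Decidable (D_transform_row_mapped row skip_indices column_map num_local_cols) := by unfold D_transform_row_mapped; infer_instance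

def Spec_transform_row_mapped (row : String) (skip_indices : List Int) (column_map : List (Int × Int)) (num_local_cols : Int) (out : String) : Prop := ¬ D_transform_row_mapped row skip_indices column_map num_local_cols → out = transform_row_mapped_alt row skip_indices column_map num_local_cols
instance (row : String) (skip_indices : List Int) (column_map : List (Int × Int)) (num_local_cols : Int) (out : String) : Decidable (Spec_transform_row_mapped row skip_indices column_map num_local_cols out) := by unfold Spec_transform_row_mapped; infer_instance

def pvDiffWitness_transform_row_mapped : String × List Int × (List (Int × Int)) × Int :=
  ("a\tb", [], [(-1, 0)], 1)
def pvDiffWitnessOut_transform_row_mapped : String × String := ("b", "\\N")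

-- ===== CLAIM (what is proved, stated in full; the proofs are below) =====
def Claim_unchanged_transform_row_mapped : Prop := ∀ (row : String) (skip_indices : List Int) (column_map : List (Int × Int)) (num_local_cols : Int), Dom_transform_row_mapped row skip_indices column_map num_local_cols → Pre_transform_row_mapped row skip_indices column_map num_local_cols → Spec_transform_row_mapped row skip_indices column_map num_local_cols (transform_row_mapped row skip_indices column_map num_local_cols)
def Claim_changed_transform_row_mapped : Prop := Dom_transform_row_mapped (pvDiffWitness_transform_row_mapped.1) (pvDiffWitness_transform_row_mapped.2.1) (pvDiffWitness_transform_row_mapped.2.2.1) (pvDiffWitness_transform_row_mapped.2.2.2) ∧ Pre_transform_row_mapped (pvDiffWitness_transform_row_mapped.1) (pvDiffWitness_transform_row_mapped.2.1) (pvDiffWitness_transform_row_mapped.2.2.1) (pvDiffWitness_transform_row_mapped.2.2.2) ∧ D_transform_row_mapped (pvDiffWitness_transform_row_mapped.1) (pvDiffWitness_transform_row_mapped.2.1) (pvDiffWitness_transform_row_mapped.2.2.1) (pvDiffWitness_transform_row_mapped.2.2.2) ∧ transform_row_mapped (pvDiffWitness_transform_row_mapped.1) (pvDiffWitness_transform_row_mapped.2.1)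 (pvDiffWitness_transform_row_mapped.2.2.1) (pvDiffWitness_transform_row_mapped.2.2.2) = pvDiffWitnessOut_transform_row_mapped.1 ∧ transform_row_mapped_alt (pvDiffWitness_transform_row_mapped.1) (pvDiffWitness_transform_row_mapped.2.1) (pvDiffWitness_transform_row_mapped.2.2.1) (pvDiffWitness_transform_row_mapped.2.2.2) = pvDiffWitnessOut_transform_row_mapped.2 ∧ pvDiffWitnessOut_transform_row_mapped.1 ≠ pvDiffWitnessOut_transform_row_mapped.2

def Claim_exact_transform_row_mapped : Prop := ∀ (row : String) (skip_indices : List Int) (column_map : List (Int × Int)) (num_local_cols : Int), Dom_transform_row_mapped row skip_indices column_map num_local_cols → Pre_transform_row_mapped row skip_indices column_map num_local_cols → D_transform_row_mapped row skip_indices column_map num_local_cols → transform_row_mapped row skip_indices column_map num_local_cols ≠ transform_row_mapped_alt row skip_indices column_map num_local_cols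

-- ===== LEMMAS AND PROOFS =====

-- pieces produced by splitting on a tab contain no tab
theorem pv_go_tabfree (fuel : Nat) : ∀ (l cur : List Char) (acc : List (List Char)),
    l.length < fuel → ('\t' ∉ cur) → (∀ x ∈ acc, '\t' ∉ x) →
    ∀ x ∈ PySem.Chars.splitOn.go ['\t'] fuel l cur acc, '\t' ∉ x := by
  induction fuel with
  | zero => intro l cur acc h; omega
  | succ fuel ih =>
    intro l cur acc hlen hcur hacc x hx
    cases l with
    | nil =>
      rw [PySem.Chars.splitOn.go.eq_2 _ _ _ _ (by omega)] at hx
      simp only [List.mem_reverse, List.mem_cons] at hx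
      rcases hx with h | h
      · subst h; simpa using hcur
      · exact hacc x h
    | cons c rest =>
      rw [PySem.Chars.splitOn.go.eq_3] at hx
      by_cases hp : List.isPrefixOf ['\t'] (c :: rest)
      · rw [if_pos hp] at hx
        have hdrop : List.drop (List.length ['\t']) (c :: rest) = rest := by simp
        rw [hdrop] at hx
        refine ih rest [] (cur.reverse :: acc) (by simp at hlen ⊢; omega) (by simp) ?_ x hx
        intro y hy
        rcases List.mem_cons.mp hy with rfl | hy
        · simpa using hcur
        · exact hacc y hy
      · rw [if_neg hp] at hx
        have hc : c ≠ '\t' := by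
          intro h; exact hp (by simp [h, List.isPrefixOf])
        refine ih rest (c :: cur) acc (by simp at hlen ⊢; omega) ?_ hacc x hx
        simp only [List.mem_cons, not_or]
        exact ⟨fun h => hc h.symm, hcur⟩

-- every filtered column is a tab-free string
theorem pv_filtered_tabfree (row : String) (skip : List Int) :
    ∀ x ∈ pvFiltered row skip, '\t' ∉ x.toList := by
  intro x hx
  unfold pvFiltered at hx
  obtain ⟨p, hp, rfl⟩ := List.mem_map.mp hx
  have hp2 := (List.mem_filter.mp hp).1
  obtain ⟨k, hk, rfl⟩ := (PySem.List.mem_enumerate_iff _ _ _).mp hp2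
  have hcols : (PySem.Str.split? row "\t").getD []
      = (PySem.Chars.splitOn row.toList ['\t']).map String.ofList := rfl
  have hall : ∀ y ∈ (PySem.Str.split? row "\t").getD [], '\t' ∉ y.toList := by
    rw [hcols]
    intro y hy
    obtain ⟨piece, hpiece, rfl⟩ := List.mem_map.mp hy
    have htf : '\t' ∉ piece := by
      unfold PySem.Chars.splitOn at hpiece
      exact pv_go_tabfree (row.toList.length + 1) row.toList [] [] (by omega) (by simp)
        (by simp) piece hpiece
    rwa [String.toList_ofList]
  exact hall _ (List.getElem_mem _)

-- xs[i] with a default is an element of xs or the default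
theorem pv_pyGetD_mem_or {a : Type} (xs : List a) (i : Int) (d : a) :
    PySem.List.pyGetD xs i d ∈ xs ∨ PySem.List.pyGetD xs i d = d := by
  unfold PySem.List.pyGetD PySem.List.pyGet?
  cases hidx : PySem.List.pyIdx? xs.length i with
  | none => right; rfl
  | some k =>
    cases hk : xs[k]? with
    | none => right; simp [hk]
    | some v =>
      left
      simp only [Option.bind_some, hk, Option.getD_some]
      exact List.mem_of_getElem? hk

-- members of a pySetD write
theorem pv_mem_pySetD {a : Type} (xs : List a) (i : Int) (v x : a)
    (hx : x ∈ PySem.List.pySetD xs i v) : x ∈ xs ∨ x = v := by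
  unfold PySem.List.pySetD PySem.List.pySet? at hx
  cases hidx : PySem.List.pyIdx? xs.length i with
  | none => rw [hidx] at hx; left; exact hx
  | some k =>
    rw [hidx] at hx
    simp only [Option.map_some, Option.getD_some] at hx
    exact List.mem_or_eq_of_mem_set hx

-- every cell of A's result is a default, a filtered column, or the pyGetD default
theorem pv_foldA_mem (f : List String) (its : List (Int × Int)) (out : List String) (x : String)
    (hx : x ∈ its.foldl (fun out p => if p.1 < (f.length : Int)
        then PySem.List.pySetD out p.2 (PySem.List.pyGetD f p.1 "") else out) out) :
    x ∈ out ∨ x ∈ f ∨ x = "" := by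
  induction its generalizing out with
  | nil => exact Or.inl hx
  | cons p its ih =>
    simp only [List.foldl_cons] at hx
    rcases ih _ hx with h | h
    · split at h
      · rcases pv_mem_pySetD _ _ _ _ h with h2 | h2
        · exact Or.inl h2
        · rcases pv_pyGetD_mem_or f p.1 "" with h3 | h3
          · exact Or.inr (Or.inl (h2 ▸ h3))
          · exact Or.inr (Or.inr (h2.trans h3))
      · exact Or.inl h
    · exact Or.inr h

-- every cell of B's result is a default or comes from the traversed pairs
theorem pv_foldB_mem (d : PySem.Dict Int Int) (ps : List (Int × String)) (out : List String)
    (x : String)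
    (hx : x ∈ ps.foldl (fun out (q : Int × String) => match d.get? q.1 with
        | some l => PySem.List.pySetD out l q.2
        | none => out) out) :
    x ∈ out ∨ ∃ q ∈ ps, x = q.2 := by
  induction ps generalizing out with
  | nil => exact Or.inl hx
  | cons q ps ih =>
    simp only [List.foldl_cons] at hx
    rcases ih _ hx with h | h
    · cases hget : d.get? q.1 with
      | none => rw [hget] at h; exact Or.inl h
      | some l =>
        rw [hget] at h
        rcases pv_mem_pySetD _ _ _ _ h with h2 | h2
        · exact Or.inl h2
        · exact Or.inr ⟨q, List.mem_cons_self, h2⟩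
    · obtain ⟨q', hq', hxq⟩ := h
      exact Or.inr ⟨q', List.mem_cons_of_mem _ hq', hxq⟩

-- '\t'.join is injective on nonempty lists of tab-free strings
theorem pv_join_inj (LA LB : List String)
    (hA : ∀ x ∈ LA, '\t' ∉ x.toList) (hB : ∀ x ∈ LB, '\t' ∉ x.toList)
    (hA0 : LA ≠ []) (hB0 : LB ≠ [])
    (h : PySem.Str.join "\t" LA = PySem.Str.join "\t" LB) : LA = LB := by
  have h' := congrArg String.toList h
  rw [PySem.Str.toList_join, PySem.Str.toList_join] at h'
  unfold PySem.Chars.join at h'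
  have hsep : ("\t" : String).toList = ['\t'] := rfl
  rw [hsep] at h'
  have hmA : List.splitOn '\t' (['\t'].intercalate (LA.map String.toList)) = LA.map String.toList :=
    List.splitOn_intercalate _ '\t'
      (by intro l hl; obtain ⟨s, hs, rfl⟩ := List.mem_map.mp hl; exact hA s hs)
      (by simpa using hA0)
  have hmB : List.splitOn '\t' (['\t'].intercalate (LB.map String.toList)) = LB.map String.toList :=
    List.splitOn_intercalate _ '\t'
      (by intro l hl; obtain ⟨s, hs, rfl⟩ := List.mem_map.mp hl; exact hB s hs)
      (by simpa using hB0)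
  have hmap : LA.map String.toList = LB.map String.toList := by
    rw [← hmA, h', hmB]
  exact List.map_injective_iff.mpr (fun a b hab => String.toList_inj.mp hab) hmap

-- Python's `output[l] = v` (possibly negative l) as a `List.set` at the normalised cell pvTgt
theorem pv_pySetD_eq {a : Type} (xs : List a) (i : Int) (v : a)
    (h1 : -(xs.length : Int) <= i) (h2 : i < (xs.length : Int)) :
    PySem.List.pySetD xs i v = xs.set (pvTgt xs.length i).toNat v := by
  unfold pvTgt
  by_cases h : i < 0
  · rw [if_pos h]
    unfold PySem.List.pySetD PySem.List.pySet? PySem.List.pyIdx?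
    rw [if_neg (by omega), if_pos h1]
    simp only [Option.map_some, Option.getD_some]
    congr 1
    omega
  · rw [if_neg h]
    exact PySem.List.pySetD_of_nonneg _ _ (by omega)

theorem pv_tgt_bounds (n i : Int) (h1 : -n <= i) (h2 : i < n) :
    0 <= pvTgt n i ∧ pvTgt n i < n := by
  unfold pvTgt; split <;> omega

-- find? returns the unique match
theorem pv_find?_eq_some_of_unique {a : Type} (l : List a) (p : a → Bool) (x : a)
    (hx : x ∈ l) (hpx : p x = true) (hu : ∀ b ∈ l, p b = true → b = x) :
    l.find? p = some x := by
  induction l with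
  | nil => cases hx
  | cons h t ih =>
    by_cases hp : p h = true
    · rw [List.find?_cons_of_pos hp, hu h List.mem_cons_self hp]
    · rw [List.find?_cons_of_neg hp]
      rcases List.mem_cons.mp hx with rfl | hxt
      · exact absurd hpx hp
      · exact ih hxt (fun b hb => hu b (List.mem_cons_of_mem _ hb))

-- A's scatter loop preserves the output length
theorem pv_foldA_length (f : List String) (its : List (Int × Int)) (out : List String) :
    (its.foldl (fun out p => if p.1 < (f.length : Int)
        then PySem.List.pySetD out p.2 (PySem.List.pyGetD f p.1 "") else out) out).length
      = out.length := by
  induction its generalizing out with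
  | nil => rfl
  | cons q its ih =>
    simp only [List.foldl_cons]
    rw [ih]
    split
    · exact PySem.List.length_pySetD _ _ _
    · rfl

-- pointwise value of A's scatter loop: the LAST applied entry targeting cell j wins
theorem pv_foldA_getElem? (f : List String) (its : List (Int × Int)) (out : List String) (j : Nat)
    (hl : ∀ p ∈ its, p.1 < (f.length : Int) →
            -(out.length : Int) <= p.2 ∧ p.2 < (out.length : Int))
    (hj : j < out.length) :
    (its.foldl (fun out p => if p.1 < (f.length : Int)
        then PySem.List.pySetD out p.2 (PySem.List.pyGetD f p.1 "") else out) out)[j]?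
      = match its.reverse.find? (fun p => decide (p.1 < (f.length : Int)) &&
            pvTgt (out.length : Int) p.2 == (j : Int)) with
        | some p => some (PySem.List.pyGetD f p.1 "")
        | none => out[j]? := by
  induction its using List.reverseRecOn with
  | nil => rfl
  | append_singleton its q ih =>
    have hl' : ∀ p ∈ its, p.1 < (f.length : Int) →
        -(out.length : Int) <= p.2 ∧ p.2 < (out.length : Int) :=
      fun p hp => hl p (List.mem_append_left _ hp)
    have hacc := pv_foldA_length f its out
    rw [List.foldl_append, List.reverse_append, List.reverse_singleton,
      List.singleton_append, List.find?_cons]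
    simp only [List.foldl_cons, List.foldl_nil]
    by_cases ha : q.1 < (f.length : Int)
    · have hq2 := hl q (List.mem_append_right _ (List.mem_singleton_self q)) ha
      have htb := pv_tgt_bounds (out.length : Int) q.2 hq2.1 hq2.2
      have hset : PySem.List.pySetD
          (its.foldl (fun out p => if p.1 < (f.length : Int)
              then PySem.List.pySetD out p.2 (PySem.List.pyGetD f p.1 "") else out) out)
          q.2 (PySem.List.pyGetD f q.1 "")
          = (its.foldl (fun out p => if p.1 < (f.length : Int)
              then PySem.List.pySetD out p.2 (PySem.List.pyGetD f p.1 "") else out) out).set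
            (pvTgt (out.length : Int) q.2).toNat (PySem.List.pyGetD f q.1 "") := by
        rw [pv_pySetD_eq _ _ _ (by rw [hacc]; exact hq2.1) (by rw [hacc]; exact hq2.2), hacc]
      by_cases hj2 : pvTgt (out.length : Int) q.2 = (j : Int)
      · have hpred : (decide (q.1 < (f.length : Int)) &&
            pvTgt (out.length : Int) q.2 == (j : Int)) = true := by simp [ha, hj2]
        rw [hpred]
        simp only [if_pos ha]
        rw [hset, hj2]
        simp only [Int.toNat_natCast]
        exact List.getElem?_set_self (by rw [hacc]; exact hj)
      · have hpred : (decide (q.1 < (f.length : Int)) &&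
            pvTgt (out.length : Int) q.2 == (j : Int)) = false := by simp [hj2]
        rw [hpred]
        simp only [if_pos ha]
        rw [hset, List.getElem?_set_ne (by omega)]
        exact ih hl'
    · have hpred : (decide (q.1 < (f.length : Int)) &&
          pvTgt (out.length : Int) q.2 == (j : Int)) = false := by simp [ha]
      rw [hpred]
      simp only [if_neg ha]
      exact ih hl'

-- B's single fused pass = the same placement loop run over the enumerated filtered columns
theorem pv_fuse (skip : List Int) (cm : PySem.Dict Int Int) (ps : List (Int × String))
    (out : List String) (i : Int) :
    (ps.foldl (fun (st : List String × Int) p =>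
        if skip.contains p.1 then st
        else ((match cm.get? st.2 with
               | some l => PySem.List.pySetD st.1 l p.2
               | none => st.1), st.2 + 1)) (out, i)).1
      = (PySem.List.enumerate ((ps.filter (fun p => !(skip.contains p.1))).map (fun p => p.2)) i).foldl
          (fun out (q : Int × String) => match cm.get? q.1 with
             | some l => PySem.List.pySetD out l q.2
             | none => out) out := by
  induction ps generalizing out i with
  | nil => rfl
  | cons p ps ih =>
    by_cases h : skip.contains p.1
    · simp only [List.foldl_cons, List.filter_cons, h, Bool.not_true]
      exact ih out i
    · simp only [List.foldl_cons, List.filter_cons, h, Bool.not_false]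
      exact ih _ (i + 1)

-- B's placement loop preserves the output length
theorem pv_foldB_length (cm : PySem.Dict Int Int) (ps : List (Int × String)) (out : List String) :
    (ps.foldl (fun out (q : Int × String) => match cm.get? q.1 with
        | some l => PySem.List.pySetD out l q.2
        | none => out) out).length = out.length := by
  induction ps generalizing out with
  | nil => rfl
  | cons q ps ih =>
    simp only [List.foldl_cons]
    rw [ih]
    split
    · exact PySem.List.length_pySetD _ _ _
    · rfl

-- pointwise value of B's placement loop
theorem pv_foldB_getElem? (cm : PySem.Dict Int Int) (ps : List (Int × String))
    (out : List String) (j : Nat)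
    (hl : ∀ q ∈ ps, ∀ l, cm.get? q.1 = some l →
            -(out.length : Int) <= l ∧ l < (out.length : Int))
    (hj : j < out.length) :
    (ps.foldl (fun out (q : Int × String) => match cm.get? q.1 with
        | some l => PySem.List.pySetD out l q.2
        | none => out) out)[j]?
      = match ps.reverse.find? (fun q => (cm.get? q.1).elim false
            (fun l => pvTgt (out.length : Int) l == (j : Int))) with
        | some q => some q.2
        | none => out[j]? := by
  induction ps using List.reverseRecOn with
  | nil => rfl
  | append_singleton ps q ih =>
    have hl' : ∀ q ∈ ps, ∀ l, cm.get? q.1 = some l →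
        -(out.length : Int) <= l ∧ l < (out.length : Int) :=
      fun q hq => hl q (List.mem_append_left _ hq)
    have hacc := pv_foldB_length cm ps out
    rw [List.foldl_append, List.reverse_append, List.reverse_singleton,
      List.singleton_append, List.find?_cons]
    simp only [List.foldl_cons, List.foldl_nil]
    cases hget : cm.get? q.1 with
    | none =>
      simp only [Option.elim]
      exact ih hl'
    | some l =>
      have hq2 := hl q (List.mem_append_right _ (List.mem_singleton_self q)) l hget
      have hset : PySem.List.pySetD
          (ps.foldl (fun out (q : Int × String) => match cm.get? q.1 with
              | some l => PySem.List.pySetD out l q.2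
              | none => out) out) l q.2
          = (ps.foldl (fun out (q : Int × String) => match cm.get? q.1 with
              | some l => PySem.List.pySetD out l q.2
              | none => out) out).set (pvTgt (out.length : Int) l).toNat q.2 := by
        rw [pv_pySetD_eq _ _ _ (by rw [hacc]; exact hq2.1) (by rw [hacc]; exact hq2.2), hacc]
      have htb := pv_tgt_bounds (out.length : Int) l hq2.1 hq2.2
      simp only [Option.elim]
      by_cases hj2 : pvTgt (out.length : Int) l = (j : Int)
      · rw [show (pvTgt (out.length : Int) l == (j : Int)) = true by simp [hj2], hset, hj2]
        simp only [Int.toNat_natCast]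
        exact List.getElem?_set_self (by rw [hacc]; exact hj)
      · rw [show (pvTgt (out.length : Int) l == (j : Int)) = false by simp [hj2], hset,
          List.getElem?_set_ne (by omega)]
        exact ih hl'

-- ===== VERDICT (by name: the statement is the Claim_ definition above) =====
theorem transform_row_mapped_spec : Claim_unchanged_transform_row_mapped := by
  intro row skip cm num _hdom hpre
  unfold Spec_transform_row_mapped
  intro hD
  unfold transform_row_mapped transform_row_mapped_alt
  dsimp only
  rw [pv_fuse]
  rw [show (((PySem.List.enumerate ((PySem.Str.split? row "\t").getD [])).filter
      (fun p => !(skip.contains p.1))).map (fun p => p.2)) = pvFiltered row skip from rfl]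
  set f := pvFiltered row skip with hf
  set d := PySem.Dict.ofList cm with hd
  set its := d.items with hits
  set out0 := List.replicate num.toNat "\\N" with hout0
  have hnd : d.keys.Nodup := PySem.Dict.nodup_keys_ofList cm
  have hlen0 : out0.length = num.toNat := List.length_replicate
  obtain ⟨hpre1, hpre2⟩ := hpre
  have hDval : ∀ p ∈ its, p.1 < 0 → -(f.length : Int) <= p.1 →
      PySem.List.pyGetD f p.1 "" = "\\N" := by
    intro p hp h1 h2
    by_contra hne
    exact hD ⟨p, hp, h1, h2, hne⟩
  apply congrArg (PySem.Str.join "\t")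
  have hlA : ∀ p ∈ its, p.1 < (f.length : Int) →
      -(out0.length : Int) <= p.2 ∧ p.2 < (out0.length : Int) := by
    intro p hp hplt
    have h1 := hpre1 p hp hplt
    rw [hlen0]
    omega
  have hlB : ∀ q ∈ PySem.List.enumerate f 0, ∀ l, d.get? q.1 = some l →
      -(out0.length : Int) <= l ∧ l < (out0.length : Int) := by
    intro q hq l hget
    obtain ⟨k, hk, rfl⟩ := (PySem.List.mem_enumerate_iff _ _ _).mp hq
    have hmem : ((0 : Int) + k, l) ∈ its := PySem.Dict.mem_items_of_get?_eq_some _ hget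
    have hplt : ((0 : Int) + k) < (f.length : Int) := by omega
    have h1 := hpre1 _ hmem hplt
    rw [hlen0]
    omega
  apply List.ext_getElem?
  intro j
  by_cases hj : j < out0.length
  · rw [pv_foldA_getElem? f its out0 j hlA hj, pv_foldB_getElem? d _ out0 j hlB hj]
    by_cases hex : ∃ p ∈ its, p.1 < (f.length : Int) ∧ pvTgt (out0.length : Int) p.2 = (j : Int)
    · obtain ⟨p0, hp0, hp0lt, hp0tgt⟩ := hex
      have hp0b := hpre1 p0 hp0 hp0lt
      have hnum : (0 : Int) < num := by omega
      have hNeq : ((out0.length : Nat) : Int) = num := by rw [hlen0]; omega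
      -- uniqueness of the entry targeting cell j among applied entries
      have hu : ∀ p ∈ its, p.1 < (f.length : Int) →
          pvTgt (out0.length : Int) p.2 = (j : Int) → p = p0 := by
        intro p hp hplt hptgt
        by_contra hne
        have hmemf : p ∈ its.filter (fun p => decide (p.1 < ((pvFiltered row skip).length : Int))) :=
          List.mem_filter.mpr ⟨hp, by rw [← hf]; simpa using hplt⟩
        have hmemf0 : p0 ∈ its.filter (fun p => decide (p.1 < ((pvFiltered row skip).length : Int))) :=
          List.mem_filter.mpr ⟨hp0, by rw [← hf]; simpa using hp0lt⟩
        have hsym : Symmetric (fun p q : Int × Int =>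
            pvTgt num p.2 ≠ pvTgt num q.2) := fun a b h => h.symm
        have := List.Pairwise.forall hsym hpre2 hmemf hmemf0 hne
        rw [hNeq] at hptgt hp0tgt
        exact this (hptgt.trans hp0tgt.symm)
      -- A's find? returns p0
      have hfindA : its.reverse.find? (fun p => decide (p.1 < (f.length : Int)) &&
          pvTgt (out0.length : Int) p.2 == (j : Int)) = some p0 := by
        apply pv_find?_eq_some_of_unique _ _ p0 (List.mem_reverse.mpr hp0) (by simp [hp0lt, hp0tgt])
        intro b hb hpb
        simp only [Bool.and_eq_true, decide_eq_true_eq, beq_iff_eq] at hpb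
        exact hu b (List.mem_reverse.mp hb) hpb.1 hpb.2
      by_cases hp0nn : (0 : Int) <= p0.1
      · -- nonnegative dump index: both write the same filtered column
        -- B's find? returns (p0.1, f[p0.1.toNat])
        have hk0 : p0.1.toNat < f.length := by omega
        have hq0mem : ((p0.1 : Int), f[p0.1.toNat]) ∈ PySem.List.enumerate f 0 := by
          rw [PySem.List.mem_enumerate_iff]
          exact ⟨p0.1.toNat, hk0, by rw [Prod.mk.injEq]; constructor; omega; rfl⟩
        have hget0 : d.get? p0.1 = some p0.2 := PySem.Dict.get?_of_mem_items _ hp0 hnd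
        have hfindB : (PySem.List.enumerate f 0).reverse.find?
            (fun q => (d.get? q.1).elim false
              (fun l => pvTgt (out0.length : Int) l == (j : Int)))
            = some ((p0.1 : Int), f[p0.1.toNat]) := by
          apply pv_find?_eq_some_of_unique _ _ _ (List.mem_reverse.mpr hq0mem)
            (by simp [hget0, hp0tgt])
          intro b hb hpb
          obtain ⟨k, hk, rfl⟩ := (PySem.List.mem_enumerate_iff _ _ _).mp (List.mem_reverse.mp hb)
          cases hget : d.get? ((0 : Int) + k) with
          | none => rw [hget] at hpb; simp [Option.elim] at hpb
          | some l =>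
            rw [hget] at hpb
            simp only [Option.elim, beq_iff_eq] at hpb
            have hmem : ((0 : Int) + k, l) ∈ its := PySem.Dict.mem_items_of_get?_eq_some _ hget
            have hplt : ((0 : Int) + k) < (f.length : Int) := by omega
            have heq := hu _ hmem hplt hpb
            have h1 : ((0 : Int) + k) = p0.1 := congrArg Prod.fst heq
            have hkk : k = p0.1.toNat := by omega
            rw [Prod.mk.injEq]
            exact ⟨h1, by subst hkk; rfl⟩
        rw [hfindA, hfindB]
        exact congrArg some (PySem.List.pyGetD_eq_getElem f "" hp0nn hp0lt)
      · -- negative dump index: A writes the NULL marker (by ¬D_), B never applies it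
        -- the unique entry targeting j is a negative dump index: A writes the NULL marker
        -- (by ¬D_), B never applies it
        have hval : PySem.List.pyGetD f p0.1 "" = "\\N" :=
          hDval p0 hp0 (by omega) hp0b.1
        have hfindB : (PySem.List.enumerate f 0).reverse.find?
            (fun q => (d.get? q.1).elim false
              (fun l => pvTgt (out0.length : Int) l == (j : Int))) = none := by
          rw [List.find?_eq_none]
          intro q hq
          obtain ⟨k, hk, rfl⟩ := (PySem.List.mem_enumerate_iff _ _ _).mp (List.mem_reverse.mp hq)
          cases hget : d.get? ((0 : Int) + k) with
          | none => simp [Option.elim]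
          | some l =>
            simp only [Option.elim, beq_iff_eq]
            intro htgt
            have hmem : ((0 : Int) + k, l) ∈ its := PySem.Dict.mem_items_of_get?_eq_some _ hget
            have hplt : ((0 : Int) + k) < (f.length : Int) := by omega
            have heq := hu _ hmem hplt htgt
            have h1 : ((0 : Int) + k) = p0.1 := congrArg Prod.fst heq
            omega
        rw [hfindA, hfindB]
        show some (PySem.List.pyGetD f p0.1 "") = out0[j]?
        rw [hval, hout0, List.getElem?_replicate, if_pos (by rw [← hlen0]; exact hj)]
    · -- no applied entry targets cell j: both finds fail
      have hfindA : its.reverse.find? (fun p => decide (p.1 < (f.length : Int)) &&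
          pvTgt (out0.length : Int) p.2 == (j : Int)) = none := by
        rw [List.find?_eq_none]
        intro p hp
        simp only [Bool.and_eq_true, decide_eq_true_eq, beq_iff_eq, not_and]
        intro hplt htgt
        exact hex ⟨p, List.mem_reverse.mp hp, hplt, htgt⟩
      have hfindB : (PySem.List.enumerate f 0).reverse.find?
          (fun q => (d.get? q.1).elim false
            (fun l => pvTgt (out0.length : Int) l == (j : Int))) = none := by
        rw [List.find?_eq_none]
        intro q hq
        obtain ⟨k, hk, rfl⟩ := (PySem.List.mem_enumerate_iff _ _ _).mp (List.mem_reverse.mp hq)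
        cases hget : d.get? ((0 : Int) + k) with
        | none => simp [Option.elim]
        | some l =>
          simp only [Option.elim, beq_iff_eq]
          intro htgt
          have hmem : ((0 : Int) + k, l) ∈ its := PySem.Dict.mem_items_of_get?_eq_some _ hget
          have hplt : ((0 : Int) + k) < (f.length : Int) := by omega
          exact hex ⟨_, hmem, hplt, htgt⟩
      rw [hfindA, hfindB]
  · rw [List.getElem?_eq_none (by rw [pv_foldA_length]; omega),
        List.getElem?_eq_none (by rw [pv_foldB_length]; omega)]

theorem transform_row_mapped_changed : Claim_changed_transform_row_mapped := by
  unfold Claim_changed_transform_row_mapped; decide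

theorem transform_row_mapped_tight : Claim_exact_transform_row_mapped := by
  intro row skip cm num _hdom hpre hD heq
  unfold transform_row_mapped transform_row_mapped_alt at heq
  dsimp only at heq
  rw [pv_fuse] at heq
  rw [show (((PySem.List.enumerate ((PySem.Str.split? row "\t").getD [])).filter
      (fun p => !(skip.contains p.1))).map (fun p => p.2)) = pvFiltered row skip from rfl] at heq
  set f := pvFiltered row skip with hf
  set d := PySem.Dict.ofList cm with hd
  set its := d.items with hits
  set out0 := List.replicate num.toNat "\\N" with hout0
  have hnd : d.keys.Nodup := PySem.Dict.nodup_keys_ofList cm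
  have hlen0 : out0.length = num.toNat := List.length_replicate
  obtain ⟨hpre1, hpre2⟩ := hpre
  obtain ⟨p0, hp0, hp0neg, hp0ge, hp0val⟩ := hD
  have hp0lt : p0.1 < (f.length : Int) := by
    have h0 : (0 : Int) <= (f.length : Int) := Int.natCast_nonneg _
    omega
  have hp0b := hpre1 p0 hp0 hp0lt
  have hnum : (0 : Int) < num := by omega
  have hNeq : ((out0.length : Nat) : Int) = num := by rw [hlen0]; omega
  have htb := pv_tgt_bounds num p0.2 hp0b.2.1 hp0b.2.2
  -- B's single pass produces the same list as A's scatter, by the assumed string equality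
  have hlisteq : (its.foldl (fun out p => if p.1 < (f.length : Int)
        then PySem.List.pySetD out p.2 (PySem.List.pyGetD f p.1 "") else out) out0)
      = ((PySem.List.enumerate f 0).foldl
          (fun out (q : Int × String) => match d.get? q.1 with
             | some l => PySem.List.pySetD out l q.2
             | none => out) out0) := by
    apply pv_join_inj _ _ ?_ ?_ ?_ ?_ heq
    · intro x hx
      rcases pv_foldA_mem f its out0 x hx with h | h | h
      · rw [List.eq_of_mem_replicate h]; decide
      · exact pv_filtered_tabfree row skip x h
      · rw [h]; simp
    · intro x hx
      rcases pv_foldB_mem d _ out0 x hx with h | ⟨q, hq, hxq⟩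
      · rw [List.eq_of_mem_replicate h]; decide
      · obtain ⟨k, hk, rfl⟩ := (PySem.List.mem_enumerate_iff _ _ _).mp hq
        rw [hxq]
        exact pv_filtered_tabfree row skip _ (List.getElem_mem hk)
    · apply List.ne_nil_of_length_pos
      rw [pv_foldA_length, hlen0]
      omega
    · apply List.ne_nil_of_length_pos
      rw [pv_foldB_length, hlen0]
      omega
  set j := (pvTgt num p0.2).toNat with hj0
  have hj : j < out0.length := by rw [hlen0]; omega
  have hp0tgt : pvTgt (out0.length : Int) p0.2 = (j : Int) := by
    rw [hNeq]
    exact (Int.toNat_of_nonneg htb.1).symm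
  have hu : ∀ p ∈ its, p.1 < (f.length : Int) →
      pvTgt (out0.length : Int) p.2 = (j : Int) → p = p0 := by
    intro p hp hplt hptgt
    by_contra hne
    have hmemf : p ∈ its.filter (fun p => decide (p.1 < ((pvFiltered row skip).length : Int))) :=
      List.mem_filter.mpr ⟨hp, by rw [← hf]; simpa using hplt⟩
    have hmemf0 : p0 ∈ its.filter (fun p => decide (p.1 < ((pvFiltered row skip).length : Int))) :=
      List.mem_filter.mpr ⟨hp0, by rw [← hf]; simpa using hp0lt⟩
    have hsym : Symmetric (fun p q : Int × Int =>
        pvTgt num p.2 ≠ pvTgt num q.2) := fun a b h => h.symm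
    have hne2 := List.Pairwise.forall hsym hpre2 hmemf hmemf0 hne
    rw [hNeq] at hptgt hp0tgt
    exact hne2 (hptgt.trans hp0tgt.symm)
  have hlA : ∀ p ∈ its, p.1 < (f.length : Int) →
      -(out0.length : Int) <= p.2 ∧ p.2 < (out0.length : Int) := by
    intro p hp hplt
    have h1 := hpre1 p hp hplt
    rw [hlen0]
    omega
  have hlB : ∀ q ∈ PySem.List.enumerate f 0, ∀ l, d.get? q.1 = some l →
      -(out0.length : Int) <= l ∧ l < (out0.length : Int) := by
    intro q hq l hget
    obtain ⟨k, hk, rfl⟩ := (PySem.List.mem_enumerate_iff _ _ _).mp hq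
    have hmem : ((0 : Int) + k, l) ∈ its := PySem.Dict.mem_items_of_get?_eq_some _ hget
    have hplt : ((0 : Int) + k, f[k]).1 < (f.length : Int) := by omega
    have h1 := hpre1 _ hmem hplt
    rw [hlen0]
    omega
  have hfindA : its.reverse.find? (fun p => decide (p.1 < (f.length : Int)) &&
      pvTgt (out0.length : Int) p.2 == (j : Int)) = some p0 := by
    apply pv_find?_eq_some_of_unique _ _ p0 (List.mem_reverse.mpr hp0) (by simp [hp0lt, hp0tgt])
    intro b hb hpb
    simp only [Bool.and_eq_true, decide_eq_true_eq, beq_iff_eq] at hpb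
    exact hu b (List.mem_reverse.mp hb) hpb.1 hpb.2
  have hfindB : (PySem.List.enumerate f 0).reverse.find?
      (fun q => (d.get? q.1).elim false
        (fun l => pvTgt (out0.length : Int) l == (j : Int))) = none := by
    rw [List.find?_eq_none]
    intro q hq
    obtain ⟨k, hk, rfl⟩ := (PySem.List.mem_enumerate_iff _ _ _).mp (List.mem_reverse.mp hq)
    cases hget : d.get? ((0 : Int) + k) with
    | none => simp [Option.elim]
    | some l =>
      simp only [Option.elim, beq_iff_eq]
      intro htgt
      have hmem : ((0 : Int) + k, l) ∈ its := PySem.Dict.mem_items_of_get?_eq_some _ hget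
      have hplt : ((0 : Int) + k) < (f.length : Int) := by omega
      have heq2 := hu _ hmem hplt htgt
      have h1 : ((0 : Int) + k) = p0.1 := congrArg Prod.fst heq2
      omega
  have hcell := congrArg (fun (L : List String) => L[j]?) hlisteq
  simp only at hcell
  rw [pv_foldA_getElem? f its out0 j hlA hj, pv_foldB_getElem? d _ out0 j hlB hj,
    hfindA, hfindB] at hcell
  rw [hout0, List.getElem?_replicate, if_pos (by rw [← hlen0]; exact hj)] at hcell
  have hfin : PySem.List.pyGetD f p0.1 "" = "\\N" := by simpa using hcell
  exact hp0val hfin
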